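-- pv_equiv track=rewrite | github.com/fp-computer-programming/hw-8-2-p22strautz | hw8-2-5.py | sum_even
-- ===== SOURCE A (Python) =====
-- def sum_even(lst):
--
--     number = 0
--
--     for x in lst:
--         if x % 2 != 0:
--             break
--         else:
--             number += x
--     return number
-- ===== SOURCE B (Python) =====
-- def sum_even(lst):
--     parities = [x % 2 for x in lst]
--     try:
--         i = parities.index(1)
--     except ValueError:
--         i = len(lst)
--     return sum(lst[:i])
-- ===== Notes on version B (the rewrite author's own statement) =====
-- stated objective: alternative
-- what changed: Replaces the fused accumulate-until-break loop by three staged passes: map each element to its parity, look up the index of the first 1 with list.index, then sum the prefix slice before that index.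
import Mathlib
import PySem

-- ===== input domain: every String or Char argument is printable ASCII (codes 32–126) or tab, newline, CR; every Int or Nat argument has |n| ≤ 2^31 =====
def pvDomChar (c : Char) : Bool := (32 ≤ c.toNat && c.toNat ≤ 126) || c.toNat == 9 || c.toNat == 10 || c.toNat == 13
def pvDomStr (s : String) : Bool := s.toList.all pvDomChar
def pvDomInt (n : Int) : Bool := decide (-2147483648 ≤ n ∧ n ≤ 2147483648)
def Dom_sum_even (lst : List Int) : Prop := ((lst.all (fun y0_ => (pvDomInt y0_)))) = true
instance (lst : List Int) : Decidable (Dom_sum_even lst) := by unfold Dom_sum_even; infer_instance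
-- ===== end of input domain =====

-- B stages the work in three passes (parity map, list.index of the first 1, sum of
-- the prefix slice) instead of A's fused accumulate-until-break loop; same O(n).


-- ===== PORT A =====
-- the for-loop with break, state = accumulator `number`
def sumEvenLoop : List Int → Int → Int
  | [], number => number
  | x :: xs, number =>
      if PySem.Int.mod x 2 ≠ 0 then number else sumEvenLoop xs (number + x)

def sum_even (lst : List Int) : Int := sumEvenLoop lst 0

-- ===== PORT B =====
def sum_even_alt (lst : List Int) : Int :=
  let parities := lst.map (fun x => PySem.Int.mod x 2)       -- [x % 2 for x in lst]
  let i := (PySem.List.index? parities 1).getD lst.length    -- parities.index(1), ValueError -> len(lst)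
  (lst.take i).sum                                            -- sum(lst[:i])

-- ===== PRECONDITION & SPEC =====
def Spec_sum_even (lst : List Int) (out : Int) : Prop := out = sum_even_alt lst
instance (lst : List Int) (out : Int) : Decidable (Spec_sum_even lst out) := by unfold Spec_sum_even; infer_instance

-- ===== CLAIM (what is proved, stated in full; the proofs are below) =====
def Claim_equal_sum_even : Prop := ∀ (lst : List Int), Dom_sum_even lst → Spec_sum_even lst (sum_even lst)

-- ===== LEMMAS AND PROOFS =====
theorem pymod_two_ne_zero_iff (x : Int) : PySem.Int.mod x 2 ≠ 0 ↔ PySem.Int.mod x 2 = 1 := by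
  have h0 := PySem.Int.mod_nonneg x (b := 2) (by norm_num)
  have h2 := PySem.Int.mod_lt x (b := 2) (by norm_num)
  omega

theorem sumEvenLoop_eq (lst : List Int) (n : Int) :
    sumEvenLoop lst n = n + (lst.take ((PySem.List.index? (lst.map (fun x => PySem.Int.mod x 2)) 1).getD lst.length)).sum := by
  induction lst generalizing n with
  | nil => simp [sumEvenLoop, PySem.List.index?]
  | cons x xs ih =>
      simp only [sumEvenLoop]
      by_cases h : PySem.Int.mod x 2 = 1
      · rw [if_pos (by omega), List.map_cons, h, PySem.List.index?_cons_self]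
        simp
      · have h0 : PySem.Int.mod x 2 = 0 := by
          have := (pymod_two_ne_zero_iff x); omega
        rw [if_neg (by omega), List.map_cons, h0,
            show PySem.List.index? (0 :: xs.map (fun x => PySem.Int.mod x 2)) 1
               = (PySem.List.index? (xs.map (fun x => PySem.Int.mod x 2)) 1).map (· + 1)
             from PySem.List.index?_cons_of_ne _ (by decide)]
        rw [ih]
        cases hidx : PySem.List.index? (xs.map (fun x => PySem.Int.mod x 2)) 1 with
        | none => simp; ring
        | some k => simp [List.take_succ_cons]; ring

-- ===== VERDICT (by name: the statement is the Claim_ definition above) =====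
theorem sum_even_spec : Claim_equal_sum_even := by
  intro lst _
  unfold Spec_sum_even sum_even sum_even_alt
  simpa using sumEvenLoop_eq lst 0
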